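-- pv_equiv track=rewrite | github.com/Charbel-11/Information-Retrieval | Phrase Queries and Error Correction/Error Correction.py | generateAllPossibleQueries
-- ===== SOURCE A (Python) =====
-- def generateAllPossibleQueries(possibleWords):
--     possibleQueries = []
--
--     def generateAllPossibleQueriesRec(curQuery, i):
--         if i == len(possibleWords):
--             possibleQueries.append(curQuery)
--             return
--
--         initialQuery = curQuery
--         for j in range(len(possibleWords[i])):
--             if curQuery != "":
--                 curQuery += " "
--             curQuery += possibleWords[i][j]
--             generateAllPossibleQueriesRec(curQuery, i + 1)
--             curQuery = initialQuery
--
--     generateAllPossibleQueriesRec("", 0)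
--     return possibleQueries
-- ===== SOURCE B (Python) =====
-- def generateAllPossibleQueries(possibleWords):
--     queries = [""]
--     for options in possibleWords:
--         queries = [q + (" " if q != "" else "") + w for q in queries for w in options]
--     return queries
-- ===== Notes on version B (the rewrite author's own statement) =====
-- stated objective: simpler
-- what changed: Replaced the recursive backtracking generator with mutable shared state by an iterative Cartesian-product builder that folds over the option lists, expanding a list of partial queries.
import Mathlib
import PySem

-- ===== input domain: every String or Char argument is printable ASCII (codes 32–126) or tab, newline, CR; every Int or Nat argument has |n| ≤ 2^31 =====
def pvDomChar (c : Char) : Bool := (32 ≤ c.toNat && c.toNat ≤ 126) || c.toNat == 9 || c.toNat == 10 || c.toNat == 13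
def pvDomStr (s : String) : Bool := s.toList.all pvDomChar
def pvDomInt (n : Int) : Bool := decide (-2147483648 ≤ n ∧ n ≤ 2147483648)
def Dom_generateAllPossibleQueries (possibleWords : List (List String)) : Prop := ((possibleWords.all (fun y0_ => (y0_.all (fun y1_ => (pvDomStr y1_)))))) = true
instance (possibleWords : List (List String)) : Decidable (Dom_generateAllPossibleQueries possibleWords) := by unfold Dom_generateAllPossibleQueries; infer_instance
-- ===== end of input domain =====

-- B replaces A's recursive backtracking generator by an iterative product builder that
-- folds over the option lists, expanding a list of partial queries (objective: simpler).

-- ===== PORT A =====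
-- inner recursion generateAllPossibleQueriesRec: recursion over the remaining suffix of
-- possibleWords (A indexes with i; the suffix recursion visits the same elements in the
-- same order), the for-loop over possibleWords[i] is a foldl appending each recursive
-- call's results, exactly as A appends into possibleQueries.
def genQueriesRecA : String → List (List String) → List String
  | curQuery, [] => [curQuery]
  | curQuery, ws :: rest =>
      ws.foldl (fun acc w =>
        acc ++ genQueriesRecA ((if curQuery ≠ "" then curQuery ++ " " else curQuery) ++ w) rest) []

def generateAllPossibleQueries (possibleWords : List (List String)) : List String :=
  genQueriesRecA "" possibleWords

-- ===== PORT B =====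
def generateAllPossibleQueries_alt (possibleWords : List (List String)) : List String :=
  possibleWords.foldl
    (fun queries options =>
      queries.flatMap (fun q => options.map (fun w => q ++ (if q ≠ "" then " " else "") ++ w)))
    [""]

-- ===== PRECONDITION & SPEC =====
def Spec_generateAllPossibleQueries (possibleWords : List (List String)) (out : List String) : Prop := out = generateAllPossibleQueries_alt possibleWords
instance (possibleWords : List (List String)) (out : List String) : Decidable (Spec_generateAllPossibleQueries possibleWords out) := by unfold Spec_generateAllPossibleQueries; infer_instance

-- ===== CLAIM (what is proved, stated in full; the proofs are below) =====
def Claim_equal_generateAllPossibleQueries : Prop := ∀ (possibleWords : List (List String)), Dom_generateAllPossibleQueries possibleWords → Spec_generateAllPossibleQueries possibleWords (generateAllPossibleQueries possibleWords)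

-- ===== LEMMAS AND PROOFS =====

theorem foldl_append_f {α β : Type} (f : α → List β) :
    ∀ (ws : List α) (a : List β),
      ws.foldl (fun acc w => acc ++ f w) a = a ++ ws.flatMap f := by
  intro ws
  induction ws with
  | nil => intro a; simp
  | cons w ws ih => intro a; simp [List.foldl, ih, List.append_assoc]

theorem joinA_eq_joinB (q w : String) :
    (if q ≠ "" then q ++ " " else q) ++ w = q ++ (if q ≠ "" then " " else "") ++ w := by
  split_ifs <;> simp [String.append_assoc]

theorem foldl_step_eq_genRec :
    ∀ (rest : List (List String)) (qs : List String),
      rest.foldl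
        (fun queries options =>
          queries.flatMap (fun q => options.map (fun w => q ++ (if q ≠ "" then " " else "") ++ w)))
        qs = qs.flatMap (fun q => genQueriesRecA q rest) := by
  intro rest
  induction rest with
  | nil => intro qs; simp [genQueriesRecA]
  | cons ws rest ih =>
      intro qs
      simp only [List.foldl, ih, List.flatMap_assoc]
      congr 1
      funext q
      rw [genQueriesRecA, foldl_append_f, List.nil_append, List.flatMap_map]
      congr 1
      funext w
      rw [joinA_eq_joinB]

-- ===== VERDICT (by name: the statement is the Claim_ definition above) =====
theorem generateAllPossibleQueries_spec : Claim_equal_generateAllPossibleQueries := by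
  intro pw _
  unfold Spec_generateAllPossibleQueries generateAllPossibleQueries generateAllPossibleQueries_alt
  rw [foldl_step_eq_genRec]
  simp
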